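-- pv_equiv track=rewrite | github.com/trivialcoding6/algorithm-study | 백준/Silver/2960. 에라토스테네스의 체/에라토스테네스의 체.py | solution
-- ===== SOURCE A (Python) =====
-- def solution(N, K):
--     numbers = [True] * (N + 1)
--     count = 0
--
--     for i in range(2, N + 1):
--         if numbers[i]:
--             for j in range(i, N + 1, i):
--                 if numbers[j]:
--                     numbers[j] = False
--                     count += 1
--                     if count == K:
--                         return j
--
--     return None
-- ===== SOURCE B (Python) =====
-- def solution(N, K):
--     if N < 2 or K < 1 or K > N - 1:
--         return None
--     spf = [0] * (N + 1)
--     for i in range(2, N + 1):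
--         if spf[i] == 0:
--             spf[i] = i
--             for j in range(i * i, N + 1, i):
--                 if spf[j] == 0:
--                     spf[j] = i
--     order = sorted(range(2, N + 1), key=lambda x: (spf[x], x))
--     return order[K - 1]
-- ===== Notes on version B (the rewrite author's own statement) =====
-- stated objective: alternative
-- what changed: Instead of simulating the crossing process with a boolean table, a counter and an early return, B computes a smallest-prime-factor table with a sieve that starts at i*i, reconstructs the whole crossing order by sorting 2..N by the key (spf[x], x), and indexes it at K-1 after an explicit bounds guard.
import Mathlib
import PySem

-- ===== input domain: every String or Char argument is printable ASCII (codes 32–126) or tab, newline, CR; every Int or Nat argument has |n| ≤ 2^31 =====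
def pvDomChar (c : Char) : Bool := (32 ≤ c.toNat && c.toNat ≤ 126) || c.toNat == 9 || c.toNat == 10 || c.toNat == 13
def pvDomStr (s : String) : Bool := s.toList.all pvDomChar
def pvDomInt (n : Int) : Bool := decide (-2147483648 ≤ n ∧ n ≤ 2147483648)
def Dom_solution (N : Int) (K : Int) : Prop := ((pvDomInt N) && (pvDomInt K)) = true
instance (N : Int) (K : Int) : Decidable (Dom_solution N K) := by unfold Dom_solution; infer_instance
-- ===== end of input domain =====

-- B replaces A's crossing simulation (boolean table + counter + early return) by a smallest-prime-factor
-- table plus a sort of 2..N by the key (spf[x], x); same return value, a genuinely different route (objective: alternative).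

-- ===== PORT A =====
-- inner 'for j in range(i, N+1, i)' loop of A; all indices reached are in 0..N, so pyGetD is exact (no IndexError is reachable).
def solveInnerA (K : Int) : List Int → List Bool → Int → ((List Bool × Int) ⊕ Int)
  | [], numbers, count => Sum.inl (numbers, count)
  | j :: js, numbers, count =>
    if PySem.List.pyGetD numbers j false then
      -- numbers[j] = False; count += 1; if count == K: return j   (j ≥ 2 here, so .toNat is exact)
      let numbers' := numbers.set j.toNat false
      let count' := count + 1
      if count' = K then Sum.inr j
      else solveInnerA K js numbers' count'
    else solveInnerA K js numbers count

-- outer 'for i in range(2, N+1)' loop of A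
def solveOuterA (N K : Int) : List Int → List Bool → Int → Option Int
  | [], _, _ => none
  | i :: is, numbers, count =>
    if PySem.List.pyGetD numbers i false then
      match solveInnerA K (PySem.List.pyRange i (N + 1) i) numbers count with
      | Sum.inr j => some j
      | Sum.inl (numbers', count') => solveOuterA N K is numbers' count'
    else solveOuterA N K is numbers count

def solution (N : Int) (K : Int) : Option Int :=
  solveOuterA N K (PySem.List.pyRange 2 (N + 1) 1) (PySem.List.pyRepeat [true] (N + 1)) 0

-- ===== PORT B =====
-- inner 'for j in range(i*i, N+1, i)' loop of B; indices in range, pyGetD exact, j ≥ 4 so .toNat exact.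
def sieveInnerB (i : Int) : List Int → List Int → List Int
  | [], spf => spf
  | j :: js, spf =>
    if PySem.List.pyGetD spf j 0 = 0 then sieveInnerB i js (spf.set j.toNat i)
    else sieveInnerB i js spf

-- outer 'for i in range(2, N+1)' loop of B
def sieveOuterB (N : Int) : List Int → List Int → List Int
  | [], spf => spf
  | i :: is, spf =>
    if PySem.List.pyGetD spf i 0 = 0 then
      sieveOuterB N is (sieveInnerB i (PySem.List.pyRange (i * i) (N + 1) i) (spf.set i.toNat i))
    else sieveOuterB N is spf

def solution_alt (N : Int) (K : Int) : Option Int :=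
  if N < 2 ∨ K < 1 ∨ N - 1 < K then none
  else
    let spf := sieveOuterB N (PySem.List.pyRange 2 (N + 1) 1) (PySem.List.pyRepeat [0] (N + 1))
    let order := PySem.List.sorted2 (PySem.List.pyRange 2 (N + 1) 1)
      (fun x => PySem.List.pyGetD spf x 0) (fun x => x) false
    PySem.List.pyGet? order (K - 1)

-- ===== PRECONDITION & SPEC =====
def Spec_solution (N : Int) (K : Int) (out : Option Int) : Prop := out = solution_alt N K
instance (N : Int) (K : Int) (out : Option Int) : Decidable (Spec_solution N K out) := by unfold Spec_solution; infer_instance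

-- ===== CLAIM (what is proved, stated in full; the proofs are below) =====
def Claim_equal_solution : Prop := ∀ (N : Int) (K : Int), Dom_solution N K → Spec_solution N K (solution N K)

-- ===== LEMMAS AND PROOFS =====

-- smallest prime factor, as an Int
def mfac (j : Int) : Int := (j.toNat.minFac : Int)

-- the multiples of p in [p, N] whose smallest prime factor is p, ascending
def bucket (N p : Int) : List Int :=
  (PySem.List.pyRange p (N + 1) p).filter (fun j => decide (mfac j = p))

-- the crossing order of the sieve, from prime i upward
def sieveList (N i : Int) : List Int :=
  (PySem.List.pyRange i (N + 1) 1).flatMap (fun p => if mfac p = p then bucket N p else [])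

theorem pyGetD_set_int {α : Type} (xs : List α) (a j : Int) (v d : α)
    (ha0 : 0 ≤ a) (haL : a < (xs.length : Int)) (hj : 0 ≤ j) :
    PySem.List.pyGetD (xs.set a.toNat v) j d = if j = a then v else PySem.List.pyGetD xs j d := by
  rw [PySem.List.pyGetD_of_nonneg _ _ hj, PySem.List.pyGetD_of_nonneg _ _ hj]
  by_cases hjl : j.toNat < xs.length
  · rw [List.getD_eq_getElem _ _ (by simpa using hjl), List.getD_eq_getElem _ _ hjl,
      List.getElem_set]
    have : a.toNat = j.toNat ↔ j = a := by omega
    simp only [this]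
  · have hlen : (xs.set a.toNat v).length = xs.length := by simp
    rw [List.getD_eq_default _ _ (by omega), List.getD_eq_default _ _ (by omega)]
    rw [if_neg (by omega)]

theorem pyRange_pos_nil (a b s : Int) (hs : 0 < s) (h : b ≤ a) :
    PySem.List.pyRange a b s = [] := by
  rw [PySem.List.pyRange_of_pos _ _ hs, if_neg (by omega)]
  simp

theorem pyRange_pos_cons (a b s : Int) (hs : 0 < s) (h : a < b) :
    PySem.List.pyRange a b s = a :: PySem.List.pyRange (a + s) b s := by
  rw [PySem.List.pyRange_of_pos _ _ hs, PySem.List.pyRange_of_pos _ _ hs, if_pos h]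
  by_cases h2 : a + s < b
  · rw [if_pos h2]
    have key : (b - a + s - 1) / s = (b - (a + s) + s - 1) / s + 1 := by
      have e : b - a + s - 1 = (b - (a + s) + s - 1) + 1 * s := by ring
      rw [e, Int.add_mul_ediv_right _ _ (by omega)]
    have hm0 : 0 ≤ (b - (a + s) + s - 1) / s := Int.ediv_nonneg (by omega) (by omega)
    rw [key]
    have ht : ((b - (a + s) + s - 1) / s + 1).toNat = ((b - (a + s) + s - 1) / s).toNat + 1 := by
      omega
    rw [ht, List.range_succ_eq_map, List.map_cons, List.map_map]
    refine congrArg₂ _ (by ring) (List.map_congr_left ?_)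
    intro k _
    simp only [Function.comp_apply]
    push_cast
    ring
  · rw [if_neg h2]
    have h1 : 1 ≤ (b - a + s - 1) / s := by
      rw [Int.le_ediv_iff_mul_le hs]; omega
    have h2' : (b - a + s - 1) / s < 2 := by
      rw [Int.ediv_lt_iff_lt_mul hs]; omega
    have : (b - a + s - 1) / s = 1 := by omega
    rw [this]
    simp

theorem pyRange_pos_pairwise (a b s : Int) (hs : 0 < s) :
    (PySem.List.pyRange a b s).Pairwise (· < ·) := by
  rw [PySem.List.pyRange_of_pos _ _ hs]
  refine List.Pairwise.map _ ?_ List.pairwise_lt_range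
  intro k k' hk
  have : s * (k : Int) < s * (k' : Int) := by
    apply mul_lt_mul_of_pos_left (by exact_mod_cast hk) hs
  omega

theorem mem_multiples {t b x : Int} (ht : 0 < t) :
    x ∈ PySem.List.pyRange t b t ↔ t ≤ x ∧ x < b ∧ t ∣ x := by
  rw [PySem.List.mem_pyRange_iff_of_pos ht]
  constructor
  · rintro ⟨h1, h2, h3⟩
    exact ⟨h1, h2, by have := dvd_add h3 (dvd_refl t); simpa using this⟩
  · rintro ⟨h1, h2, h3⟩
    exact ⟨h1, h2, dvd_sub h3 (dvd_refl t)⟩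

theorem mem_multiples_sq {t b x : Int} (ht : 0 < t) :
    x ∈ PySem.List.pyRange (t * t) b t ↔ t * t ≤ x ∧ x < b ∧ t ∣ x := by
  rw [PySem.List.mem_pyRange_iff_of_pos ht]
  constructor
  · rintro ⟨h1, h2, h3⟩
    refine ⟨h1, h2, ?_⟩
    have := dvd_add h3 (dvd_mul_left t t)
    simpa using this
  · rintro ⟨h1, h2, h3⟩
    refine ⟨h1, h2, ?_⟩
    exact dvd_sub h3 (dvd_mul_left t t)

theorem mfac_two_le {j : Int} (h : 2 ≤ j) : 2 ≤ mfac j := by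
  have h1 : j.toNat ≠ 1 := by omega
  have := (Nat.minFac_prime h1).two_le
  unfold mfac; omega

theorem mfac_le_self {j : Int} (h : 2 ≤ j) : mfac j ≤ j := by
  have := Nat.minFac_le (n := j.toNat) (by omega)
  unfold mfac; omega

theorem mfac_dvd {j : Int} (h : 0 ≤ j) : mfac j ∣ j := by
  have := Nat.minFac_dvd j.toNat
  have h2 : ((j.toNat.minFac : Int)) ∣ ((j.toNat : Int)) := Int.natCast_dvd_natCast.mpr this
  unfold mfac
  rwa [Int.toNat_of_nonneg h] at h2

theorem mfac_le_of_dvd {t j : Int} (ht : 2 ≤ t) (hd : t ∣ j) (hj : 2 ≤ j) : mfac j ≤ t := by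
  have hd' : t.toNat ∣ j.toNat := by
    have : ((t.toNat : Int)) ∣ ((j.toNat : Int)) := by
      rw [Int.toNat_of_nonneg (by omega : (0:Int) ≤ t), Int.toNat_of_nonneg (by omega : (0:Int) ≤ j)]
      exact hd
    exact_mod_cast this
  have := Nat.minFac_le_of_dvd (by omega) hd'
  unfold mfac; omega

theorem mfac_mfac {j : Int} (h : 2 ≤ j) : mfac (mfac j) = mfac j := by
  have hp : (j.toNat.minFac).Prime := Nat.minFac_prime (by omega)
  have : (j.toNat.minFac).minFac = j.toNat.minFac := (Nat.prime_def_minFac.mp hp).2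
  unfold mfac
  rw [Int.toNat_natCast]
  exact_mod_cast this

theorem mfac_sq_le {j : Int} (h : 2 ≤ j) (hne : mfac j ≠ j) : mfac j * mfac j ≤ j := by
  have hnp : ¬ (j.toNat).Prime := by
    intro hp
    have := (Nat.prime_def_minFac.mp hp).2
    unfold mfac at hne
    omega
  have := Nat.minFac_sq_le_self (n := j.toNat) (by omega) hnp
  unfold mfac
  have : j.toNat.minFac * j.toNat.minFac ≤ j.toNat := by
    have h2 := this
    rwa [pow_two] at h2
  zify at this
  omega

theorem mem_bucket {N p j : Int} (hp : 2 ≤ p) :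
    j ∈ bucket N p ↔ 2 ≤ j ∧ j ≤ N ∧ mfac j = p := by
  unfold bucket
  rw [List.mem_filter]
  rw [mem_multiples (by omega)]
  constructor
  · rintro ⟨⟨h1, h2, h3⟩, h4⟩
    exact ⟨by omega, by omega, by simpa using h4⟩
  · rintro ⟨h1, h2, h3⟩
    have hd : p ∣ j := h3 ▸ mfac_dvd (by omega)
    have hle : p ≤ j := h3 ▸ mfac_le_self h1
    exact ⟨⟨hle, by omega, hd⟩, by simpa using h3⟩

theorem bucket_pairwise (N p : Int) (hp : 0 < p) : (bucket N p).Pairwise (· < ·) :=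
  (pyRange_pos_pairwise _ _ _ hp).filter _

theorem mem_sieveList {N i x : Int} (hi : 2 ≤ i) :
    x ∈ sieveList N i ↔ 2 ≤ x ∧ x ≤ N ∧ i ≤ mfac x := by
  unfold sieveList
  rw [List.mem_flatMap]
  constructor
  · rintro ⟨p, hp, hx⟩
    rw [PySem.List.mem_pyRange_one] at hp
    by_cases hpp : mfac p = p
    · rw [if_pos hpp] at hx
      rw [mem_bucket (by omega)] at hx
      refine ⟨hx.1, hx.2.1, ?_⟩
      rw [hx.2.2]; omega
    · rw [if_neg hpp] at hx; simp at hx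
  · rintro ⟨h1, h2, h3⟩
    refine ⟨mfac x, ?_, ?_⟩
    · rw [PySem.List.mem_pyRange_one]
      have := mfac_le_self h1
      omega
    · rw [if_pos (mfac_mfac h1), mem_bucket (mfac_two_le h1)]
      exact ⟨h1, h2, rfl⟩

theorem sieveList_key_pairwise (N i : Int) (hi : 2 ≤ i) :
    (sieveList N i).Pairwise (fun a b => (toLex (mfac a, a) : Lex (Int × Int)) < toLex (mfac b, b)) := by
  unfold sieveList
  rw [List.pairwise_flatMap]
  constructor
  · intro p hp
    rw [PySem.List.mem_pyRange_one] at hp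
    by_cases hpp : mfac p = p
    · rw [if_pos hpp]
      refine ((bucket_pairwise N p (by omega)).imp_of_mem ?_)
      intro a b ha hb hab
      rw [mem_bucket (by omega)] at ha hb
      rw [Prod.Lex.lt_iff]; simp only [ofLex_toLex]
      right
      exact ⟨by rw [ha.2.2, hb.2.2], hab⟩
    · rw [if_neg hpp]; simp
  · refine (pyRange_pos_pairwise i (N+1) 1 (by omega)).imp_of_mem ?_
    intro p q hp hq hpq x hx y hy
    rw [PySem.List.mem_pyRange_one] at hp hq
    by_cases hpp : mfac p = p
    · by_cases hqq : mfac q = q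
      · rw [if_pos hpp] at hx; rw [if_pos hqq] at hy
        rw [mem_bucket (by omega)] at hx
        rw [mem_bucket (by omega)] at hy
        rw [Prod.Lex.lt_iff]; simp only [ofLex_toLex]
        left
        rw [hx.2.2, hy.2.2]
        exact hpq
      · rw [if_neg hqq] at hy; simp at hy
    · rw [if_neg hpp] at hx; simp at hx

theorem sieveList_nodup (N i : Int) (hi : 2 ≤ i) : (sieveList N i).Nodup := by
  have h := sieveList_key_pairwise N i hi
  refine h.imp ?_
  intro a b hab hEq
  subst hEq
  exact lt_irrefl _ hab

theorem sieveList_cons {N i : Int} (h : i < N + 1) :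
    sieveList N i = (if mfac i = i then bucket N i else []) ++ sieveList N (i + 1) := by
  unfold sieveList
  rw [pyRange_pos_cons i (N+1) 1 (by omega) h, List.flatMap_cons]

theorem sieveList_nil {N i : Int} (h : N + 1 ≤ i) : sieveList N i = [] := by
  unfold sieveList
  rw [pyRange_pos_nil i (N+1) 1 (by omega) h]
  rfl

theorem sieveList_perm (N : Int) :
    (sieveList N 2).Perm (PySem.List.pyRange 2 (N + 1) 1) := by
  rw [List.perm_ext_iff_of_nodup (sieveList_nodup N 2 (by omega)) (PySem.List.nodup_pyRange_one _ _)]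
  intro x
  rw [mem_sieveList (by omega), PySem.List.mem_pyRange_one]
  constructor
  · rintro ⟨h1, h2, _⟩; omega
  · rintro ⟨h1, h2⟩
    exact ⟨by omega, by omega, mfac_two_le (by omega)⟩

theorem sieveList_length (N : Int) : ((sieveList N 2).length : Int) = (N + 1 - 2).toNat := by
  rw [(sieveList_perm N).length_eq, PySem.List.length_pyRange_one]

theorem innerA_spec (K : Int) (L : List Int) : ∀ (numbers : List Bool) (c : Int),
    L.Pairwise (· < ·) →
    (∀ j ∈ L, 0 ≤ j ∧ j < (numbers.length : Int)) →
    (c < K ∧ K ≤ c + ((L.filter (fun j => PySem.List.pyGetD numbers j false)).length : Int) ∧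
      solveInnerA K L numbers c =
        Sum.inr ((L.filter (fun j => PySem.List.pyGetD numbers j false)).getD ((K - c).toNat - 1) 0))
    ∨ (¬(c < K ∧ K ≤ c + ((L.filter (fun j => PySem.List.pyGetD numbers j false)).length : Int)) ∧
        ∃ nb, solveInnerA K L numbers c =
            Sum.inl (nb, c + ((L.filter (fun j => PySem.List.pyGetD numbers j false)).length : Int)) ∧
          nb.length = numbers.length ∧
          ∀ j : Int, 0 ≤ j →
            PySem.List.pyGetD nb j false =
              (PySem.List.pyGetD numbers j false && !decide (j ∈ L))) := by
  induction L with
  | nil =>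
    intro numbers c _ _
    right
    refine ⟨by simp, numbers, ?_, rfl, ?_⟩
    · simp [solveInnerA]
    · intro j _; simp
  | cons j0 js IH =>
    intro numbers c hpw hb
    have hj0 : 0 ≤ j0 ∧ j0 < (numbers.length : Int) := hb j0 (by simp)
    have hj0js : ∀ j ∈ js, j0 < j := by
      intro j hj; exact (List.pairwise_cons.mp hpw).1 j hj
    have hj0nm : j0 ∉ js := fun h => lt_irrefl j0 (hj0js j0 h)
    have hpw' : js.Pairwise (· < ·) := (List.pairwise_cons.mp hpw).2
    by_cases h0 : PySem.List.pyGetD numbers j0 false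
    · -- numbers[j0] is True: cross it
      have hfc : (j0 :: js).filter (fun j => PySem.List.pyGetD numbers j false) =
          j0 :: js.filter (fun j => PySem.List.pyGetD numbers j false) :=
        List.filter_cons_of_pos (by simpa using h0)
      have hset : ∀ j : Int, 0 ≤ j →
          PySem.List.pyGetD (numbers.set j0.toNat false) j false =
            if j = j0 then false else PySem.List.pyGetD numbers j false := by
        intro j hj
        exact pyGetD_set_int numbers j0 j false false hj0.1 hj0.2 hj
      have hfilt : js.filter (fun j => PySem.List.pyGetD (numbers.set j0.toNat false) j false) =
          js.filter (fun j => PySem.List.pyGetD numbers j false) := by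
        apply List.filter_congr
        intro j hj
        rw [hset j (hb j (by simp [hj])).1, if_neg (by have := hj0js j hj; omega)]
      by_cases hKc : c + 1 = K
      · -- early return at j0
        left
        rw [hfc]
        refine ⟨by omega, by simp; omega, ?_⟩
        simp only [solveInnerA, h0, if_true, if_pos hKc]
        have : (K - c).toNat - 1 = 0 := by omega
        rw [this]
        rfl
      · have hrun : solveInnerA K (j0 :: js) numbers c =
            solveInnerA K js (numbers.set j0.toNat false) (c + 1) := by
          simp only [solveInnerA, h0, if_true, if_neg hKc]
        have hb' : ∀ j ∈ js, 0 ≤ j ∧ j < (((numbers.set j0.toNat false).length : Nat) : Int) := by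
          intro j hj
          have := hb j (by simp [hj])
          simpa using this
        rcases IH (numbers.set j0.toNat false) (c + 1) hpw' hb' with ⟨h1, h2, h3⟩ | ⟨h1, nb, h2, h3, h4⟩
        · -- recursion returned early
          left
          rw [hfilt] at h2 h3
          rw [hfc]
          refine ⟨by omega, by simp; omega, ?_⟩
          rw [hrun, h3]
          congr 1
          have hidx : (K - c).toNat - 1 = ((K - (c + 1)).toNat - 1) + 1 := by omega
          rw [hidx]
          rfl
        · right
          rw [hfilt] at h1 h2
          rw [hfc]
          constructor
          · simp only [List.length_cons]
            push_cast at h1 ⊢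
            omega
          · refine ⟨nb, ?_, by simpa using h3, ?_⟩
            · rw [hrun, h2]
              congr 2
              simp only [List.length_cons]
              push_cast
              ring
            · intro j hj
              rw [h4 j hj, hset j hj]
              by_cases hjj : j = j0
              · subst hjj
                simp [h0, hj0nm]
              · rw [if_neg hjj]
                have : (j ∈ j0 :: js) ↔ (j ∈ js) := by simp [hjj]
                simp only [this]
    · -- numbers[j0] is False: skip
      have h0' : PySem.List.pyGetD numbers j0 false = false := by
        simpa using h0
      have hfc : (j0 :: js).filter (fun j => PySem.List.pyGetD numbers j false) =
          js.filter (fun j => PySem.List.pyGetD numbers j false) :=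
        List.filter_cons_of_neg (by simpa using h0')
      have hrun : solveInnerA K (j0 :: js) numbers c = solveInnerA K js numbers c := by
        simp only [solveInnerA, h0', Bool.false_eq_true, if_false]
      have hb' : ∀ j ∈ js, 0 ≤ j ∧ j < (numbers.length : Int) := by
        intro j hj; exact hb j (by simp [hj])
      rcases IH numbers c hpw' hb' with ⟨h1, h2, h3⟩ | ⟨h1, nb, h2, h3, h4⟩
      · left
        rw [hfc, hrun]
        exact ⟨h1, h2, h3⟩
      · right
        rw [hfc, hrun]
        refine ⟨h1, nb, h2, h3, ?_⟩
        intro j hj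
        rw [h4 j hj]
        by_cases hjj : j = j0
        · subst hjj
          simp [h0', hj0nm]
        · have : (j ∈ j0 :: js) ↔ (j ∈ js) := by simp [hjj]
          simp only [this]

theorem outerA_spec (N K : Int) (hN : 2 ≤ N) : ∀ (n : Nat) (t : Int) (numbers : List Bool) (c : Int),
    (N + 1 - t).toNat = n → 2 ≤ t →
    numbers.length = (N + 1).toNat →
    (∀ j : Int, 2 ≤ j → j ≤ N → PySem.List.pyGetD numbers j false = decide (t ≤ mfac j)) →
    solveOuterA N K (PySem.List.pyRange t (N + 1) 1) numbers c =
      (if c < K ∧ K ≤ c + ((sieveList N t).length : Int)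
       then some ((sieveList N t).getD ((K - c).toNat - 1) 0) else none) := by
  intro n
  induction n using Nat.strong_induction_on with
  | _ n IH =>
    intro t numbers c hn ht hlen hinv
    by_cases htN : N + 1 ≤ t
    · rw [pyRange_pos_nil _ _ _ one_pos htN, sieveList_nil htN]
      simp only [solveOuterA, List.length_nil]
      rw [if_neg (by omega)]
    · have htN' : t < N + 1 := by omega
      have htleN : t ≤ N := by omega
      have hlenInt : (numbers.length : Int) = N + 1 := by rw [hlen]; omega
      rw [pyRange_pos_cons t (N + 1) 1 one_pos htN']
      have hreadt := hinv t ht htleN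
      by_cases hprime : mfac t = t
      · have hrt : PySem.List.pyGetD numbers t false = true := by
          rw [hreadt]; simp; omega
        have hfilter :
            (PySem.List.pyRange t (N + 1) t).filter (fun j => PySem.List.pyGetD numbers j false) =
              bucket N t := by
          unfold bucket
          apply List.filter_congr
          intro j hj
          rw [mem_multiples (by omega)] at hj
          obtain ⟨hj1, hj2, hj3⟩ := hj
          rw [hinv j (by omega) (by omega)]
          apply decide_eq_decide.mpr
          have := mfac_le_of_dvd ht hj3 (by omega)
          omega
        have hbounds : ∀ j ∈ PySem.List.pyRange t (N + 1) t, 0 ≤ j ∧ j < (numbers.length : Int) := by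
          intro j hj
          rw [mem_multiples (by omega)] at hj
          omega
        rcases innerA_spec K (PySem.List.pyRange t (N + 1) t) numbers c
            (pyRange_pos_pairwise _ _ _ (by omega)) hbounds with
          ⟨h1, h2, h3⟩ | ⟨h1, nb, h2, h3, h4⟩
        · rw [hfilter] at h2 h3
          have hrun : solveOuterA N K (t :: PySem.List.pyRange (t + 1) (N + 1) 1) numbers c
              = some ((bucket N t).getD ((K - c).toNat - 1) 0) := by
            simp only [solveOuterA, hrt, if_true, h3]
          rw [hrun]
          rw [sieveList_cons htN', if_pos hprime]
          have hlb : ((bucket N t).length : Int) ≤ ((bucket N t ++ sieveList N (t + 1)).length : Int) := by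
            simp
          rw [if_pos (by omega)]
          have hidx : (K - c).toNat - 1 < (bucket N t).length := by omega
          rw [List.getD_append _ _ _ _ hidx]
        · rw [hfilter] at h1 h2
          have hrun : solveOuterA N K (t :: PySem.List.pyRange (t + 1) (N + 1) 1) numbers c
              = solveOuterA N K (PySem.List.pyRange (t + 1) (N + 1) 1) nb
                  (c + ((bucket N t).length : Int)) := by
            simp only [solveOuterA, hrt, if_true, h2]
          rw [hrun]
          have hinv' : ∀ j : Int, 2 ≤ j → j ≤ N →
              PySem.List.pyGetD nb j false = decide (t + 1 ≤ mfac j) := by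
            intro j hj1 hj2
            rw [h4 j (by omega)]
            rw [hinv j hj1 hj2]
            by_cases hm : j ∈ PySem.List.pyRange t (N + 1) t
            · have hd : t ∣ j := ((mem_multiples (by omega)).mp hm).2.2
              have := mfac_le_of_dvd ht hd (by omega)
              simp [hm]
              omega
            · have hnd : ¬ t ∣ j := by
                intro hd
                exact hm ((mem_multiples (by omega)).mpr
                  ⟨Int.le_of_dvd (by omega) hd, by omega, hd⟩)
              have hne : mfac j ≠ t := by
                intro he
                exact hnd (he ▸ mfac_dvd (by omega))
              simp [hm]
              omega
          rw [IH (N + 1 - (t + 1)).toNat (by omega) (t + 1) nb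
            (c + ((bucket N t).length : Int)) rfl (by omega) (by rw [h3, hlen]) hinv']
          rw [sieveList_cons htN', if_pos hprime]
          by_cases hcond : c + ((bucket N t).length : Int) < K ∧
              K ≤ c + ((bucket N t).length : Int) + ((sieveList N (t + 1)).length : Int)
          · rw [if_pos hcond, if_pos (by simp only [List.length_append]; push_cast; omega)]
            have hge : (bucket N t).length ≤ (K - c).toNat - 1 := by omega
            rw [List.getD_append_right _ _ _ _ hge]
            have hidx2 : (K - (c + ((bucket N t).length : Int))).toNat - 1 =
                (K - c).toNat - 1 - (bucket N t).length := by omega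
            rw [hidx2]
          · rw [if_neg hcond, if_neg (by simp only [List.length_append]; push_cast; omega)]
      · have hrt : PySem.List.pyGetD numbers t false = false := by
          rw [hreadt]
          have := mfac_le_self ht
          simp
          omega
        have hrun : solveOuterA N K (t :: PySem.List.pyRange (t + 1) (N + 1) 1) numbers c
            = solveOuterA N K (PySem.List.pyRange (t + 1) (N + 1) 1) numbers c := by
          simp only [solveOuterA, hrt, Bool.false_eq_true, if_false]
        rw [hrun]
        have hinv' : ∀ j : Int, 2 ≤ j → j ≤ N →
            PySem.List.pyGetD numbers j false = decide (t + 1 ≤ mfac j) := by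
          intro j hj1 hj2
          rw [hinv j hj1 hj2]
          apply decide_eq_decide.mpr
          have hne : mfac j ≠ t := by
            intro he
            have := mfac_mfac (j := j) (by omega)
            rw [he] at this
            exact hprime this
          omega
        rw [IH (N + 1 - (t + 1)).toNat (by omega) (t + 1) numbers c rfl (by omega) hlen hinv']
        rw [sieveList_cons htN', if_neg hprime]
        simp

theorem solution_eq (N K : Int) (hN : 2 ≤ N) :
    solution N K =
      (if 0 < K ∧ K ≤ ((sieveList N 2).length : Int)
       then some ((sieveList N 2).getD (K.toNat - 1) 0) else none) := by
  unfold solution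
  rw [PySem.List.pyRepeat_singleton]
  have hinv : ∀ j : Int, 2 ≤ j → j ≤ N →
      PySem.List.pyGetD (List.replicate (N + 1).toNat true) j false = decide (2 ≤ mfac j) := by
    intro j hj1 hj2
    rw [PySem.List.pyGetD_of_nonneg _ _ (by omega)]
    rw [List.getD_eq_getElem _ _ (by simp; omega)]
    rw [List.getElem_replicate]
    have := mfac_two_le hj1
    simp
    omega
  rw [outerA_spec N K hN (N + 1 - 2).toNat 2 _ 0 rfl (by omega) (by simp) hinv]
  norm_num

theorem innerB_spec (i : Int) (L : List Int) : ∀ (spf : List Int),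
    L.Pairwise (· < ·) →
    (∀ j ∈ L, 0 ≤ j ∧ j < (spf.length : Int)) →
    (sieveInnerB i L spf).length = spf.length ∧
    ∀ j : Int, 0 ≤ j →
      PySem.List.pyGetD (sieveInnerB i L spf) j 0 =
        (if j ∈ L ∧ PySem.List.pyGetD spf j 0 = 0 then i else PySem.List.pyGetD spf j 0) := by
  induction L with
  | nil =>
    intro spf _ _
    refine ⟨rfl, ?_⟩
    intro j _
    simp [sieveInnerB]
  | cons j0 js IH =>
    intro spf hpw hb
    have hj0 : 0 ≤ j0 ∧ j0 < (spf.length : Int) := hb j0 (by simp)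
    have hj0js : ∀ j ∈ js, j0 < j := fun j hj => (List.pairwise_cons.mp hpw).1 j hj
    have hj0nm : j0 ∉ js := fun h => lt_irrefl j0 (hj0js j0 h)
    have hpw' : js.Pairwise (· < ·) := (List.pairwise_cons.mp hpw).2
    by_cases h0 : PySem.List.pyGetD spf j0 0 = 0
    · have hset : ∀ j : Int, 0 ≤ j →
          PySem.List.pyGetD (spf.set j0.toNat i) j 0 =
            if j = j0 then i else PySem.List.pyGetD spf j 0 := by
        intro j hj
        exact pyGetD_set_int spf j0 j i 0 hj0.1 hj0.2 hj
      have hb' : ∀ j ∈ js, 0 ≤ j ∧ j < (((spf.set j0.toNat i).length : Nat) : Int) := by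
        intro j hj
        have := hb j (by simp [hj])
        simpa using this
      obtain ⟨hlen, hread⟩ := IH (spf.set j0.toNat i) hpw' hb'
      have hrun : sieveInnerB i (j0 :: js) spf = sieveInnerB i js (spf.set j0.toNat i) := by
        simp only [sieveInnerB, h0, if_true]
      refine ⟨by rw [hrun, hlen]; simp, ?_⟩
      intro j hj
      rw [hrun, hread j hj, hset j hj]
      by_cases hjj : j = j0
      · subst hjj
        simp [hj0nm, h0]
      · rw [if_neg hjj]
        have hmem : (j ∈ j0 :: js) ↔ (j ∈ js) := by simp [hjj]
        simp only [hmem]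
    · obtain ⟨hlen, hread⟩ := IH spf hpw' (fun j hj => hb j (by simp [hj]))
      have hrun : sieveInnerB i (j0 :: js) spf = sieveInnerB i js spf := by
        simp only [sieveInnerB, h0, if_false]
      refine ⟨by rw [hrun, hlen], ?_⟩
      intro j hj
      rw [hrun, hread j hj]
      by_cases hjj : j = j0
      · subst hjj
        simp [hj0nm, h0]
      · have hmem : (j ∈ j0 :: js) ↔ (j ∈ js) := by simp [hjj]
        simp only [hmem]

theorem outerB_spec (N : Int) (hN : 2 ≤ N) : ∀ (n : Nat) (t : Int) (spf : List Int),
    (N + 1 - t).toNat = n → 2 ≤ t →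
    spf.length = (N + 1).toNat →
    (∀ j : Int, 2 ≤ j → j ≤ N →
      PySem.List.pyGetD spf j 0 = (if mfac j < t then mfac j else 0)) →
    ∀ j : Int, 2 ≤ j → j ≤ N →
      PySem.List.pyGetD (sieveOuterB N (PySem.List.pyRange t (N + 1) 1) spf) j 0 = mfac j := by
  intro n
  induction n using Nat.strong_induction_on with
  | _ n IH =>
    intro t spf hn ht hlen hinv
    by_cases htN : N + 1 ≤ t
    · rw [pyRange_pos_nil _ _ _ one_pos htN]
      intro j hj1 hj2
      have h1 := hinv j hj1 hj2
      have h2 := mfac_le_self hj1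
      rw [show sieveOuterB N [] spf = spf from rfl, h1, if_pos (by omega)]
    · have htN' : t < N + 1 := by omega
      have hlenInt : (spf.length : Int) = N + 1 := by rw [hlen]; omega
      rw [pyRange_pos_cons t (N + 1) 1 one_pos htN']
      have hreadt := hinv t ht (by omega)
      by_cases hprime : mfac t = t
      · have hrt : PySem.List.pyGetD spf t 0 = 0 := by
          rw [hreadt, if_neg (by omega)]
        have hset : ∀ j : Int, 0 ≤ j →
            PySem.List.pyGetD (spf.set t.toNat t) j 0 =
              if j = t then t else PySem.List.pyGetD spf j 0 := by
          intro j hj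
          exact pyGetD_set_int spf t j t 0 (by omega) (by omega) hj
        have hb : ∀ j ∈ PySem.List.pyRange (t * t) (N + 1) t,
            0 ≤ j ∧ j < (((spf.set t.toNat t).length : Nat) : Int) := by
          intro j hj
          rw [mem_multiples_sq (by omega)] at hj
          have : t * t ≥ 0 := mul_nonneg (by omega) (by omega)
          simp only [List.length_set]
          omega
        obtain ⟨hlen2, hread2⟩ := innerB_spec t (PySem.List.pyRange (t * t) (N + 1) t)
          (spf.set t.toNat t) (pyRange_pos_pairwise _ _ _ (by omega)) hb
        have hrun : sieveOuterB N (t :: PySem.List.pyRange (t + 1) (N + 1) 1) spf =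
            sieveOuterB N (PySem.List.pyRange (t + 1) (N + 1) 1)
              (sieveInnerB t (PySem.List.pyRange (t * t) (N + 1) t) (spf.set t.toNat t)) := by
          simp only [sieveOuterB, hrt, if_true]
        rw [hrun]
        have hinv' : ∀ j : Int, 2 ≤ j → j ≤ N →
            PySem.List.pyGetD (sieveInnerB t (PySem.List.pyRange (t * t) (N + 1) t)
              (spf.set t.toNat t)) j 0 = (if mfac j < t + 1 then mfac j else 0) := by
          intro j hj1 hj2
          rw [hread2 j (by omega), hset j (by omega)]
          by_cases hjt : j = t
          · subst hjt
            have hnm : j ∉ PySem.List.pyRange (j * j) (N + 1) j := by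
              rw [mem_multiples_sq (by omega)]
              rintro ⟨h1, _, _⟩
              nlinarith
            simp only [hnm, false_and, if_false]
            rw [if_pos trivial, if_pos (show mfac j < j + 1 by omega)]
            exact hprime.symm
          · rw [if_neg hjt]
            by_cases hlt : mfac j < t
            · -- already set to its (smaller) prime factor; 2 ≤ mfac j so entry ≠ 0
              have h2 := mfac_two_le hj1
              have hr : PySem.List.pyGetD spf j 0 = mfac j := by
                rw [hinv j hj1 hj2, if_pos hlt]
              rw [hr, if_neg (by omega), if_pos (by omega)]
            · have hr0 : PySem.List.pyGetD spf j 0 = 0 := by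
                rw [hinv j hj1 hj2, if_neg hlt]
              by_cases heq : mfac j = t
              · have hji : mfac j ≠ j := by
                  intro he
                  rw [he] at heq
                  omega
                have hsq : mfac j * mfac j ≤ j := mfac_sq_le hj1 hji
                have hm : j ∈ PySem.List.pyRange (t * t) (N + 1) t := by
                  rw [mem_multiples_sq (by omega)]
                  refine ⟨by rw [← heq]; exact hsq, by omega, by rw [← heq]; exact mfac_dvd (by omega)⟩
                rw [if_pos ⟨hm, hr0⟩, if_pos (by omega)]
                omega
              · have hnd : ¬ t ∣ j := by
                  intro hd
                  have := mfac_le_of_dvd ht hd hj1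
                  omega
                have hnm : j ∉ PySem.List.pyRange (t * t) (N + 1) t := by
                  rw [mem_multiples_sq (by omega)]
                  rintro ⟨_, _, hd⟩
                  exact hnd hd
                simp only [hnm, false_and, if_false]
                rw [hr0, if_neg (by omega)]
        exact IH (N + 1 - (t + 1)).toNat (by omega) (t + 1)
          _ rfl (by omega) (by rw [hlen2]; simp [hlen]) hinv'
      · have hrt : PySem.List.pyGetD spf t 0 ≠ 0 := by
          have h2 := mfac_two_le ht
          have h3 := mfac_le_self ht
          rw [hreadt, if_pos (by omega)]
          omega
        have hrun : sieveOuterB N (t :: PySem.List.pyRange (t + 1) (N + 1) 1) spf =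
            sieveOuterB N (PySem.List.pyRange (t + 1) (N + 1) 1) spf := by
          simp only [sieveOuterB, hrt, if_false]
        rw [hrun]
        have hinv' : ∀ j : Int, 2 ≤ j → j ≤ N →
            PySem.List.pyGetD spf j 0 = (if mfac j < t + 1 then mfac j else 0) := by
          intro j hj1 hj2
          rw [hinv j hj1 hj2]
          have hne : mfac j ≠ t := by
            intro he
            have := mfac_mfac (j := j) (by omega)
            rw [he] at this
            exact hprime this
          by_cases hlt : mfac j < t
          · rw [if_pos hlt, if_pos (by omega)]
          · rw [if_neg hlt, if_neg (by omega)]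
        exact IH (N + 1 - (t + 1)).toNat (by omega) (t + 1) spf rfl (by omega) hlen hinv'

theorem sorted2_eq_sorted_lex (xs : List Int) (k1 : Int → Int) :
    PySem.List.sorted2 xs k1 (fun x => x) false =
      PySem.List.sorted xs (fun x => (toLex (k1 x, x) : Lex (Int × Int))) false := by
  unfold PySem.List.sorted2 PySem.List.sorted
  have hf : (fun (a b : Int) =>
        (decide (k1 a < k1 b) || (!decide (k1 b < k1 a) && decide (a < b)))) =
      (fun (a b : Int) => decide ((toLex (k1 a, a) : Lex (Int × Int)) < toLex (k1 b, b))) := by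
    funext a b
    simp only [Prod.Lex.lt_iff, ofLex_toLex]
    rcases lt_trichotomy (k1 a) (k1 b) with h | h | h
    · simp [h]
    · simp [h]
    · simp [h, not_lt_of_gt h]
      omega
  simp only [if_neg (by simp : ¬ (false = true))]
  rw [hf]

theorem solution_alt_eq (N K : Int) (hN : 2 ≤ N) (hK1 : 1 ≤ K) (hK2 : K ≤ N - 1) :
    solution_alt N K = some ((sieveList N 2).getD (K - 1).toNat 0) := by
  unfold solution_alt
  rw [if_neg (by omega)]
  dsimp only
  have hspf : ∀ x : Int, 2 ≤ x → x ≤ N →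
      PySem.List.pyGetD (sieveOuterB N (PySem.List.pyRange 2 (N + 1) 1)
        (PySem.List.pyRepeat [0] (N + 1))) x 0 = mfac x := by
    apply outerB_spec N hN (N + 1 - 2).toNat 2 _ rfl (by omega)
    · rw [PySem.List.pyRepeat_singleton]; simp
    · intro j hj1 hj2
      rw [PySem.List.pyRepeat_singleton, PySem.List.pyGetD_of_nonneg _ _ (by omega),
        List.getD_eq_getElem _ _ (by simp; omega), List.getElem_replicate]
      rw [if_neg (by have := mfac_two_le hj1; omega)]
  have horder : PySem.List.sorted2 (PySem.List.pyRange 2 (N + 1) 1)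
      (fun x => PySem.List.pyGetD (sieveOuterB N (PySem.List.pyRange 2 (N + 1) 1)
        (PySem.List.pyRepeat [0] (N + 1))) x 0) (fun x => x) false = sieveList N 2 := by
    rw [sorted2_eq_sorted_lex]
    apply PySem.List.sorted_eq_of_perm_of_pairwise_lt
    · exact sieveList_perm N
    · refine (sieveList_key_pairwise N 2 (by omega)).imp_of_mem ?_
      intro a b ha hb hab
      rw [mem_sieveList (by omega)] at ha hb
      rw [hspf a ha.1 ha.2.1, hspf b hb.1 hb.2.1]
      exact hab
  rw [horder]
  have hlen := sieveList_length N
  have h01 : K - 1 = (((K - 1).toNat : Nat) : Int) := by omega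
  rw [h01, PySem.List.pyGet?_natCast]
  rw [List.getElem?_eq_getElem (by omega), List.getD_eq_getElem _ _ (by omega)]
  simp

-- ===== VERDICT (by name: the statement is the Claim_ definition above) =====
theorem solution_spec : Claim_equal_solution := by
  intro N K _
  unfold Spec_solution
  by_cases hN : N < 2
  · have hA : solution N K = none := by
      unfold solution
      rw [pyRange_pos_nil 2 (N + 1) 1 (by omega) (by omega)]
      rfl
    have hB : solution_alt N K = none := by
      unfold solution_alt
      rw [if_pos (Or.inl hN)]
    rw [hA, hB]
  · have hN2 : 2 ≤ N := by omega
    by_cases hK : 1 ≤ K ∧ K ≤ N - 1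
    · rw [solution_eq N K hN2, solution_alt_eq N K hN2 hK.1 hK.2]
      have hlen := sieveList_length N
      rw [if_pos (by omega)]
      have : K.toNat - 1 = (K - 1).toNat := by omega
      rw [this]
    · rw [solution_eq N K hN2]
      have hlen := sieveList_length N
      have hB : solution_alt N K = none := by
        unfold solution_alt
        rw [if_pos (by omega)]
      rw [hB, if_neg (by omega)]
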